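-- pv_equiv track=rewrite | github.com/mchlrd/EECS1015 | Laboratories/lab9/lab9_task4.py | intersecting_chars
-- ===== SOURCE A (Python) =====
-- from typing import List
--
-- def intersecting_chars(my_str: str) -> List[str]:
--
--     '''
--
--     Args:
--         my_str: string of characters to compare
--
--     Returns: List of int that contains the repeating char
--
--     >>> intersecting_chars("ab_ab_bCC")
--     ['b']
--     >>> intersecting_chars("abc_abc_abc")
--     ['a', 'b', 'c']
--     >>> intersecting_chars("ab_b_b")
--     ['b']
--     >>> intersecting_chars("_a_a")
--     []
--
--     '''
--     assert type(my_str) == str, 'invalid input type'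
--     assert my_str.count('_') == 2, 'only two underscores is accepted in the string'
--     assert all(char.isalpha() or char == '_' for char in my_str), 'must contain only letters'
--
--     parts = my_str.lower().split('_')
--
--     sets = [set(part) for part in parts]
--
--     intersection = set.intersection(*sets)
--
--     return sorted(intersection)
-- ===== SOURCE B (Python) =====
-- def intersecting_chars(my_str):
--     assert type(my_str) == str, 'invalid input type'
--     assert my_str.count('_') == 2, 'only two underscores is accepted in the string'
--     assert all(char.isalpha() or char == '_' for char in my_str), 'must contain only letters'
--
--     parts = my_str.lower().split('_')
--
--     # one dedup pass over the first part, checking membership in the remaining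
--     # parts directly: no set objects and no set.intersection call
--     common = []
--     for c in parts[0]:
--         if c not in common and all(c in p for p in parts[1:]):
--             common.append(c)
--     common.sort()
--     return common
-- ===== Notes on version B (the rewrite author's own statement) =====
-- stated objective: alternative
-- what changed: Replaces per-part set construction plus set.intersection by a single deduplicating scan over the first part that keeps each character contained in every remaining part, then sorts the plain list; no set objects are built.
import Mathlib
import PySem

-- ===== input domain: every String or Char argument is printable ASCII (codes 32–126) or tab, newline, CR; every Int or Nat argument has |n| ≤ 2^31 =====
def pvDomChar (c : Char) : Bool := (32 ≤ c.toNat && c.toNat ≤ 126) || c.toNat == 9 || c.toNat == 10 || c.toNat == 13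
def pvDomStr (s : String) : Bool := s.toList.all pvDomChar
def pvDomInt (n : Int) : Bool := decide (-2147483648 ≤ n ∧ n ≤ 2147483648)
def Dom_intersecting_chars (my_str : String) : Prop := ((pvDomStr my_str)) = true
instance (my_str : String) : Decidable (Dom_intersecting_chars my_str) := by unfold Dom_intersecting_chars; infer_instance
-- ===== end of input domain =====

-- B replaces per-part sets + set.intersection by one deduplicating scan over the first
-- part checking membership in the remaining parts, then a plain list sort (alternative).
-- Both ports work over Chars and wrap each resulting char as a 1-char string at the end:
-- exact, since Python sorts 1-char ASCII strings exactly by code point.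

-- ===== PORT A =====
def intersecting_chars (my_str : String) : List String :=
  -- the three asserts are ported as Pre_intersecting_chars
  -- parts = my_str.lower().split('_'); sets = [set(part) for part in parts]
  match (PySem.Chars.splitOn (PySem.Chars.lower my_str.toList) ['_']).map
      (fun part => PySem.Set.ofList part) with
  | [] => []  -- unreachable: str.split always returns at least one part
  | s0 :: rest =>
    -- intersection = set.intersection(*sets); return sorted(intersection)
    (PySem.List.sorted (rest.foldl (fun a t => PySem.Set.inter a t) s0) (fun c => c)).map
      (fun c => String.ofList [c])

-- ===== PORT B =====
def intersecting_chars_alt (my_str : String) : List String :=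
  -- the three asserts are ported as Pre_intersecting_chars
  match PySem.Chars.splitOn (PySem.Chars.lower my_str.toList) ['_'] with
  | [] => []  -- unreachable: str.split always returns at least one part
  | p0 :: ps =>
    -- common = []; for c in parts[0]: if c not in common and all(c in p for p in parts[1:]): common.append(c)
    let common := p0.foldl (fun acc c =>
      if ¬ acc.contains c ∧ ps.all (fun p => p.contains c) then acc ++ [c] else acc) []
    -- common.sort(); return common
    (PySem.List.sorted common (fun c => c)).map (fun c => String.ofList [c])

-- ===== PRECONDITION & SPEC =====
-- Pre_ = exactly the inputs passing A's two content asserts (the type assert always holds):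
-- the string contains exactly two '_' and otherwise only alphabetic characters.
def Pre_intersecting_chars (my_str : String) : Prop :=
  PySem.Chars.count my_str.toList ['_'] = 2 ∧
  my_str.toList.all (fun c => PySem.Chars.isalpha c || c == '_') = true
instance (my_str : String) : Decidable (Pre_intersecting_chars my_str) := by
  unfold Pre_intersecting_chars; infer_instance

def pvWitness_intersecting_chars : String := "ab_ab_bCC"

def Spec_intersecting_chars (my_str : String) (out : List String) : Prop := out = intersecting_chars_alt my_str
instance (my_str : String) (out : List String) : Decidable (Spec_intersecting_chars my_str out) := by unfold Spec_intersecting_chars; infer_instance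

-- ===== CLAIM (what is proved, stated in full; the proofs are below) =====
def Claim_equal_intersecting_chars : Prop := ∀ (my_str : String), Dom_intersecting_chars my_str → Pre_intersecting_chars my_str → Spec_intersecting_chars my_str (intersecting_chars my_str)

-- ===== LEMMAS AND PROOFS =====

-- str.split never returns the empty list
lemma pv_go_ne_nil (sep : List Char) (fuel : Nat) (l cur : List Char)
    (acc : List (List Char)) : PySem.Chars.splitOn.go sep fuel l cur acc ≠ [] := by
  induction fuel generalizing l cur acc with
  | zero => cases l <;> simp [PySem.Chars.splitOn.go]
  | succ n ih =>
    cases l with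
    | nil => simp [PySem.Chars.splitOn.go]
    | cons c rest =>
      rw [PySem.Chars.splitOn.go]
      split
      · exact ih _ _ _
      · exact ih _ _ _

lemma pv_splitOn_ne_nil (cs : List Char) : PySem.Chars.splitOn cs ['_'] ≠ [] := by
  rw [PySem.Chars.splitOn]; exact pv_go_ne_nil _ _ _ _ _

-- membership in the folded intersection (A's side)
lemma pv_mem_foldl_inter (x : Char) (rest : List (PySem.Set Char)) :
    ∀ s : PySem.Set Char,
      x ∈ rest.foldl (fun a t => PySem.Set.inter a t) s ↔ x ∈ s ∧ ∀ t ∈ rest, x ∈ t := by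
  induction rest with
  | nil => intro s; simp
  | cons t ts ih =>
    intro s
    simp only [List.foldl_cons, ih, PySem.Set.mem_inter, List.mem_cons]
    constructor
    · rintro ⟨⟨h1, h2⟩, h3⟩
      exact ⟨h1, fun u hu => by rcases hu with rfl | hu; exact h2; exact h3 u hu⟩
    · rintro ⟨h1, h2⟩
      exact ⟨⟨h1, h2 t (Or.inl rfl)⟩, fun u hu => h2 u (Or.inr hu)⟩

lemma pv_nodup_foldl_inter (rest : List (PySem.Set Char)) :
    ∀ s : PySem.Set Char, s.Nodup →
      (rest.foldl (fun a t => PySem.Set.inter a t) s).Nodup := by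
  induction rest with
  | nil => intro s h; exact h
  | cons t ts ih =>
    intro s h
    exact ih _ (PySem.Set.nodup_inter s t h)

-- B's dedup fold: membership characterisation
lemma pv_mem_fold_common (ps : List (List Char)) (x : Char) (l : List Char) :
    ∀ acc : List Char,
      (x ∈ l.foldl (fun acc c =>
          if ¬ acc.contains c ∧ ps.all (fun p => p.contains c) then acc ++ [c] else acc) acc)
        ↔ x ∈ acc ∨ (x ∈ l ∧ ps.all (fun p => p.contains x) = true) := by
  induction l with
  | nil => intro acc; simp
  | cons c cs ih =>
    intro acc
    simp only [List.foldl_cons]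
    by_cases h : ¬ acc.contains c ∧ ps.all (fun p => p.contains c) = true
    · rw [if_pos h, ih]
      constructor
      · rintro (hx | ⟨hx, hall⟩)
        · rcases List.mem_append.mp hx with hx | hx
          · exact Or.inl hx
          · simp at hx; subst hx
            exact Or.inr ⟨List.mem_cons_self .., h.2⟩
        · exact Or.inr ⟨List.mem_cons_of_mem _ hx, hall⟩
      · rintro (hx | ⟨hx, hall⟩)
        · exact Or.inl (List.mem_append.mpr (Or.inl hx))
        · rcases List.mem_cons.mp hx with rfl | hx'
          · exact Or.inl (List.mem_append.mpr (Or.inr (by simp)))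
          · exact Or.inr ⟨hx', hall⟩
    · rw [if_neg h, ih]
      constructor
      · rintro (hx | ⟨hx, hall⟩)
        · exact Or.inl hx
        · exact Or.inr ⟨List.mem_cons_of_mem _ hx, hall⟩
      · rintro (hx | ⟨hx, hall⟩)
        · exact Or.inl hx
        · rcases List.mem_cons.mp hx with rfl | hx'
          · by_cases hc : acc.contains x = true
            · exact Or.inl (by simpa [List.contains_eq_mem] using hc)
            · exact absurd ⟨hc, hall⟩ h
          · exact Or.inr ⟨hx', hall⟩

-- B's dedup fold: no duplicates
lemma pv_nodup_fold_common (ps : List (List Char)) (l : List Char) :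
    ∀ acc : List Char, acc.Nodup →
      (l.foldl (fun acc c =>
          if ¬ acc.contains c ∧ ps.all (fun p => p.contains c) then acc ++ [c] else acc) acc).Nodup := by
  induction l with
  | nil => intro acc h; exact h
  | cons c cs ih =>
    intro acc hacc
    simp only [List.foldl_cons]
    by_cases h : ¬ acc.contains c ∧ ps.all (fun p => p.contains c) = true
    · rw [if_pos h]
      refine ih _ ?_
      have hc : c ∉ acc := by
        have := h.1; rwa [Bool.not_eq_true, List.contains_eq_mem, decide_eq_false_iff_not] at this
      simp [List.nodup_append, hacc]
      intro a ha rfl; exact hc ha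
    · rw [if_neg h]; exact ih _ hacc

-- ===== VERDICT (by name: the statement is the Claim_ definition above) =====
theorem intersecting_chars_spec : Claim_equal_intersecting_chars := by
  intro my_str _hdom _hpre
  unfold Spec_intersecting_chars intersecting_chars intersecting_chars_alt
  obtain ⟨p0, ps, hparts⟩ : ∃ p0 ps,
      PySem.Chars.splitOn (PySem.Chars.lower my_str.toList) ['_'] = p0 :: ps := by
    cases h : PySem.Chars.splitOn (PySem.Chars.lower my_str.toList) ['_'] with
    | nil => exact absurd h (pv_splitOn_ne_nil _)
    | cons a b => exact ⟨a, b, rfl⟩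
  rw [hparts]
  simp only [List.map_cons]
  apply congrArg (List.map (fun c => String.ofList [c]))
  apply PySem.List.sorted_eq_sorted_of_perm _ _ _ (fun a b h => h)
  rw [List.perm_ext_iff_of_nodup
    (pv_nodup_foldl_inter _ _ (PySem.Set.nodup_ofList p0))
    (pv_nodup_fold_common ps p0 [] List.nodup_nil)]
  intro a
  rw [pv_mem_foldl_inter, pv_mem_fold_common, PySem.Set.mem_ofList]
  constructor
  · rintro ⟨h0, hrest⟩
    refine Or.inr ⟨h0, ?_⟩
    rw [List.all_eq_true]
    intro p hp
    have := hrest (PySem.Set.ofList p) (List.mem_map.mpr ⟨p, hp, rfl⟩)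
    rw [PySem.Set.mem_ofList] at this
    simpa [List.contains_eq_mem] using this
  · rintro (hx | ⟨h0, hall⟩)
    · simp at hx
    · refine ⟨h0, ?_⟩
      intro t ht
      rcases List.mem_map.mp ht with ⟨p, hp, rfl⟩
      rw [PySem.Set.mem_ofList]
      rw [List.all_eq_true] at hall
      simpa [List.contains_eq_mem] using hall p hp
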